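-- pv_equiv track=rewrite | github.com/skrowll/trybe-project-restaurant-orders | src/analyze_log.py | get_days_that_client_never_camed
-- ===== SOURCE A (Python) =====
-- def get_days_that_client_never_camed(client, data):
--     available_days = set([order[2] for order in data])
--     filtered_days_that_client_never_camed = set(
--         [order[2] for order in data if order[0] == client]
--     )
--     for days in filtered_days_that_client_never_camed:
--         available_days.remove(days)
--     return available_days
-- ===== SOURCE B (Python) =====
-- def get_days_that_client_never_camed(client, data):
--     index = {}
--     for order in data:
--         index.setdefault(order[2], set()).add(order[0])
--     return {day for day, clients in index.items() if client not in clients}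
-- ===== Notes on version B (the rewrite author's own statement) =====
-- stated objective: alternative
-- what changed: Instead of building the set of all days and subtracting the set of the client's days, B makes one pass building a day->clients index (dict of sets) and then keeps the days whose client-set does not contain the client.
import Mathlib
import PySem

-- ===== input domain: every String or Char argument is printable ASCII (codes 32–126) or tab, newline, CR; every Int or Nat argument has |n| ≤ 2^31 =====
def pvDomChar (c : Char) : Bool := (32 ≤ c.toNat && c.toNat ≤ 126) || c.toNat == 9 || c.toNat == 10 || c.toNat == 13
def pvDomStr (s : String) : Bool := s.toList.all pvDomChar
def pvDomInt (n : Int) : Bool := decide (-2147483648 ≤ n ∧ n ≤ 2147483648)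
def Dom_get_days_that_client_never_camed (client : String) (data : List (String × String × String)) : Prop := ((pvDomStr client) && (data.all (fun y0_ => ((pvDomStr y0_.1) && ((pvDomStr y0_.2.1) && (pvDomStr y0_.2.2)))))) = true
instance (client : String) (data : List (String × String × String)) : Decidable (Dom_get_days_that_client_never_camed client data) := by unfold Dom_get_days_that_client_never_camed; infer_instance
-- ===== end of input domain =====

-- B builds a day→clients index in one pass and keeps the days whose client-set misses the client,
-- instead of A's subtraction of the client's day-set from the all-days set (alternative decomposition, same cost).

-- ===== PORT A =====
def get_days_that_client_never_camed (client : String) (data : List (String × String × String)) : List String :=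
  let available_days : PySem.Set String := PySem.Set.ofList (data.map (fun order => order.2.2))
  let filtered_days : PySem.Set String :=
    PySem.Set.ofList ((data.filter (fun order => order.1 == client)).map (fun order => order.2.2))
  -- 'available_days.remove(days)' never raises: filtered_days ⊆ available_days, so remove? is always some
  -- (the loop iterates a Python set, but the resulting set does not depend on that iteration order)
  filtered_days.foldl (fun s days => (PySem.Set.remove? s days).getD s) available_days

-- ===== PORT B =====
def get_days_that_client_never_camed_alt (client : String) (data : List (String × String × String)) : List String :=
  let index : PySem.Dict String (PySem.Set String) :=
    data.foldl (fun d order => d.modify order.2.2 PySem.Set.empty (fun s => PySem.Set.add s order.1)) PySem.Dict.empty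
  PySem.Set.ofList ((index.items.filter (fun p => !(PySem.Set.contains p.2 client))).map (fun p => p.1))

-- ===== PRECONDITION & SPEC =====
def Spec_get_days_that_client_never_camed (client : String) (data : List (String × String × String)) (out : List String) : Prop := out = get_days_that_client_never_camed_alt client data
instance (client : String) (data : List (String × String × String)) (out : List String) : Decidable (Spec_get_days_that_client_never_camed client data out) := by unfold Spec_get_days_that_client_never_camed; infer_instance

-- ===== CLAIM (what is proved, stated in full; the proofs are below) =====
def Claim_equal_get_days_that_client_never_camed : Prop := ∀ (client : String) (data : List (String × String × String)), Dom_get_days_that_client_never_camed client data → Spec_get_days_that_client_never_camed client data (get_days_that_client_never_camed client data)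

-- ===== LEMMAS AND PROOFS =====

-- one step of A's removal loop is 'discard' (when the element is absent both sides are s)
theorem remove_getD_eq_discard {α : Type} [BEq α] [LawfulBEq α] (s : PySem.Set α) (x : α) :
    (PySem.Set.remove? s x).getD s = PySem.Set.discard s x := by
  by_cases h : x ∈ s
  · rw [PySem.Set.remove?_of_mem h]; rfl
  · have h1 : PySem.Set.remove? s x = none := by
      rw [PySem.Set.remove?_eq_none_iff]; exact h
    have h2 : PySem.Set.discard s x = s := by
      simp only [PySem.Set.discard]
      apply List.filter_eq_self.mpr
      intro y hy
      cases hyx : y == x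
      · simp
      · exact absurd (eq_of_beq hyx ▸ hy) h
    rw [h1, h2]; rfl

-- A's removal loop filters out exactly the members of the removed list
theorem foldl_discard_eq_filter {α : Type} [BEq α] [LawfulBEq α] (F : List α) (s : List α) :
    F.foldl (fun s d => (PySem.Set.remove? s d).getD s) s = s.filter (fun y => !(F.contains y)) := by
  induction F generalizing s with
  | nil => simp
  | cons x rest ih =>
      rw [List.foldl_cons, remove_getD_eq_discard, ih]
      simp only [PySem.Set.discard]
      rw [List.filter_filter]
      apply List.filter_congr
      intro y _
      simp only [List.contains_cons]
      cases h : y == x <;> simp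

-- membership of the client in B's per-day set after the grouping fold
theorem mem_group_fold (client k : String) (data : List (String × String × String))
    (d : PySem.Dict String (PySem.Set String)) :
    (client ∈ (data.foldl (fun d order => d.modify order.2.2 PySem.Set.empty (fun s => PySem.Set.add s order.1)) d).getD k PySem.Set.empty
      ↔ client ∈ d.getD k PySem.Set.empty ∨ ∃ o ∈ data, o.2.2 = k ∧ o.1 = client) := by
  induction data generalizing d with
  | nil => simp
  | cons o rest ih =>
      rw [List.foldl_cons, ih, PySem.Dict.getD_modify]
      by_cases hk : k = o.2.2
      · subst hk
        rw [if_pos rfl, PySem.Set.mem_add]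
        constructor
        · rintro ((h | h) | ⟨a, ha, h1, h2⟩)
          · exact Or.inl h
          · exact Or.inr ⟨o, by simp, rfl, h.symm⟩
          · exact Or.inr ⟨a, List.mem_cons_of_mem _ ha, h1, h2⟩
        · rintro (h | ⟨a, ha, h1, h2⟩)
          · exact Or.inl (Or.inl h)
          · rcases List.mem_cons.mp ha with rfl | ha'
            · exact Or.inl (Or.inr h2.symm)
            · exact Or.inr ⟨a, ha', h1, h2⟩
      · rw [if_neg hk]
        constructor
        · rintro (h | ⟨a, ha, h1, h2⟩)
          · exact Or.inl h
          · exact Or.inr ⟨a, List.mem_cons_of_mem _ ha, h1, h2⟩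
        · rintro (h | ⟨a, ha, h1, h2⟩)
          · exact Or.inl h
          · rcases List.mem_cons.mp ha with rfl | ha'
            · exact absurd h1 (fun e => hk e.symm)
            · exact Or.inr ⟨a, ha', h1, h2⟩

theorem get_days_equal (client : String) (data : List (String × String × String)) :
    get_days_that_client_never_camed client data = get_days_that_client_never_camed_alt client data := by
  simp only [get_days_that_client_never_camed, get_days_that_client_never_camed_alt]
  rw [foldl_discard_eq_filter]
  have hkeys : (data.foldl (fun d order => d.modify order.2.2 PySem.Set.empty (fun s => PySem.Set.add s order.1)) PySem.Dict.empty).keys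
      = PySem.Set.ofList (data.map (fun o => o.2.2)) := by
    rw [PySem.Dict.keys_foldl_modify_key data (fun o => o.2.2) PySem.Set.empty
          (fun _ o => (fun s => PySem.Set.add s o.1)) PySem.Dict.empty]
    exact PySem.Set.update_empty _
  have hnodup : (data.foldl (fun d order => d.modify order.2.2 PySem.Set.empty (fun s => PySem.Set.add s order.1)) PySem.Dict.empty).keys.Nodup := by
    rw [hkeys]; exact PySem.Set.nodup_ofList _
  rw [PySem.Dict.items_eq_map_keys _ hnodup PySem.Set.empty, hkeys, List.filter_map, List.map_map]
  simp only [Function.comp_def]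
  rw [List.map_id']
  rw [PySem.Set.ofList_eq_self_of_nodup _ ((PySem.Set.nodup_ofList _).filter _)]
  apply List.filter_congr
  intro k hk
  congr 1
  rw [Bool.eq_iff_iff, List.contains_iff_mem, PySem.Set.contains_eq_listContains, List.contains_iff_mem]
  rw [PySem.Set.mem_ofList]
  rw [mem_group_fold client k data PySem.Dict.empty]
  simp only [PySem.Dict.getD_empty]
  constructor
  · intro h
    rcases List.mem_map.mp h with ⟨o, ho, h1⟩
    rcases List.mem_filter.mp ho with ⟨ho', hc⟩
    exact Or.inr ⟨o, ho', h1, by simpa using hc⟩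
  · rintro (h | ⟨o, ho, h1, h2⟩)
    · simp [PySem.Set.empty] at h
    · exact List.mem_map.mpr ⟨o, List.mem_filter.mpr ⟨ho, by simp [h2]⟩, h1⟩

-- ===== VERDICT (by name: the statement is the Claim_ definition above) =====
theorem get_days_that_client_never_camed_spec : Claim_equal_get_days_that_client_never_camed := by
  intro client data _
  unfold Spec_get_days_that_client_never_camed
  exact get_days_equal client data
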